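-- pv_equiv track=rewrite | github.com/Terminou/Obfuscated-Program-Dataset | obfuscated_programs/18.py | responseOfNeighbours
-- ===== SOURCE A (Python) =====
-- import operator
--
-- def responseOfNeighbours(neighbours):
--     neighboursList = {}
--     for i in range(len(neighbours)):
--         res = neighbours[i][-1]
--         if res in neighboursList:
--             neighboursList[res] += 1
--         else:
--             neighboursList[res] = 1
--     votes = sorted(neighboursList.items(), key=operator.itemgetter(1), reverse=True)
--     return votes[0][0]
-- ===== SOURCE B (Python) =====
-- def responseOfNeighbours(neighbours):
--     labels = [row[-1] for row in neighbours]
--     best = labels[0]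
--     best_count = 0
--     seen = set()
--     for lab in labels:
--         if lab not in seen:
--             seen.add(lab)
--             c = labels.count(lab)
--             if c > best_count:
--                 best = lab
--                 best_count = c
--     return best
-- ===== Notes on version B (the rewrite author's own statement) =====
-- stated objective: alternative
-- what changed: Replaces A's index-loop counting dict plus a stable reverse sort of the items with a direct scan: extract the label list, walk it keeping a seen-set, and for each first-seen label compare labels.count(label) against the running best (strict >, so the first-appearing label wins ties) - no dict and no sort.
-- outside the precondition, e.g. on responseOfNeighbours([]): A raises IndexError, B raises IndexError; on responseOfNeighbours([[1], []]): A raises IndexError, B raises IndexError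
import Mathlib
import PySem

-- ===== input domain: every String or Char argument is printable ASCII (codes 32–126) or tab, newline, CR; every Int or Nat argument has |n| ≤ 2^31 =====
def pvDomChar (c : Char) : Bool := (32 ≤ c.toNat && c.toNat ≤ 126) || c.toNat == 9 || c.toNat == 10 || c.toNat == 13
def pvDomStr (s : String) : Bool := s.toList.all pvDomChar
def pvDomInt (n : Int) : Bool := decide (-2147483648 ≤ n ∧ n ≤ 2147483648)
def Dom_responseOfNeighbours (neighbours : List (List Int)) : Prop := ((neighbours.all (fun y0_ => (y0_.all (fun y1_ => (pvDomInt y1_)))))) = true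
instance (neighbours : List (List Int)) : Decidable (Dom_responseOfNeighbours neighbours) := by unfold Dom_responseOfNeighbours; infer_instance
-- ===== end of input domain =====

-- B replaces A's counting dict + stable reverse sort by a single seen-set/count scan (first-seen label wins ties); same results, no speed claim.

-- ===== PORT A =====
-- row[-1]; none = IndexError, excluded by Pre_ (every row nonempty there)
def pvLast (row : List Int) : Int := (PySem.List.pyGet? row (-1)).getD 0

def responseOfNeighbours (neighbours : List (List Int)) : Int :=
  let d : PySem.Dict Int Int :=
    (PySem.List.pyRange 0 (PySem.List.len neighbours)).foldl
      (fun d i =>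
        let res := pvLast (PySem.List.pyGetD neighbours i [])
        if d.contains res then d.insert res (d.getD res 0 + 1) else d.insert res 1)
      PySem.Dict.empty
  let votes := PySem.List.sorted d.items (fun p => p.2) true
  -- votes[0][0]; empty votes = IndexError, excluded by Pre_ (neighbours nonempty there)
  ((PySem.List.pyGet? votes 0).getD (0, 0)).1

-- ===== PORT B =====
def responseOfNeighbours_alt (neighbours : List (List Int)) : Int :=
  let labels := neighbours.map pvLast
  -- labels[0]; none = IndexError, excluded by Pre_
  let best0 := (PySem.List.pyGet? labels 0).getD 0
  let st := labels.foldl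
    (fun (st : Int × Int × PySem.Set Int) lab =>
      if PySem.Set.contains st.2.2 lab then st
      else
        let seen := PySem.Set.add st.2.2 lab
        let c : Int := (labels.count lab : Int)
        if st.2.1 < c then (lab, c, seen) else (st.1, st.2.1, seen))
    (best0, 0, PySem.Set.empty)
  st.1

-- ===== PRECONDITION & SPEC =====
-- Pre_ excludes exactly the inputs where A raises IndexError: an empty neighbours list
-- (votes[0]) or a neighbour row that is empty (row[-1]). B raises IndexError there too.
def Pre_responseOfNeighbours (neighbours : List (List Int)) : Prop :=
  neighbours ≠ [] ∧ ∀ row ∈ neighbours, row ≠ []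
instance (neighbours : List (List Int)) : Decidable (Pre_responseOfNeighbours neighbours) := by
  unfold Pre_responseOfNeighbours; infer_instance

def pvWitness_responseOfNeighbours : List (List Int) := [[1, 2], [3, 2], [0, 5]]

def Spec_responseOfNeighbours (neighbours : List (List Int)) (out : Int) : Prop := out = responseOfNeighbours_alt neighbours
instance (neighbours : List (List Int)) (out : Int) : Decidable (Spec_responseOfNeighbours neighbours out) := by unfold Spec_responseOfNeighbours; infer_instance

-- ===== CLAIM (what is proved, stated in full; the proofs are below) =====
def Claim_equal_responseOfNeighbours : Prop := ∀ (neighbours : List (List Int)), Dom_responseOfNeighbours neighbours → Pre_responseOfNeighbours neighbours → Spec_responseOfNeighbours neighbours (responseOfNeighbours neighbours)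

-- ===== LEMMAS AND PROOFS =====

-- the distinct labels of l that are not yet in s, in first-appearance order
def pvNew (s : PySem.Set Int) : List Int → List Int
  | [] => []
  | x :: t => if PySem.Set.contains s x then pvNew s t else x :: pvNew (PySem.Set.add s x) t

theorem pvFoldl_add_eq_append (l : List Int) : ∀ (s : PySem.Set Int),
    l.foldl PySem.Set.add s = s ++ pvNew s l := by
  induction l with
  | nil => intro s; simp [pvNew]
  | cons x t ih =>
    intro s
    by_cases h : PySem.Set.contains s x
    · have hm : x ∈ s := by simpa [PySem.Set.contains] using h
      simp [pvNew, hm, List.foldl_cons, ih]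
    · have hm : x ∉ s := by simpa [PySem.Set.contains] using h
      simp [pvNew, hm, List.foldl_cons, ih]

theorem pvNew_empty_eq_ofList (l : List Int) : pvNew PySem.Set.empty l = PySem.Set.ofList l := by
  have := pvFoldl_add_eq_append l PySem.Set.empty
  rw [PySem.Set.ofList_eq_foldl]
  simpa [PySem.Set.empty] using this.symm

-- B's seen-filtered loop equals the plain best/count loop over the new distinct labels
theorem pvB_fold (cnt : Int → Int) : ∀ (l : List Int) (s : PySem.Set Int) (b c : Int),
    l.foldl
      (fun (st : Int × Int × PySem.Set Int) lab =>
        if PySem.Set.contains st.2.2 lab then st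
        else
          if st.2.1 < cnt lab then (lab, cnt lab, PySem.Set.add st.2.2 lab)
          else (st.1, st.2.1, PySem.Set.add st.2.2 lab))
      (b, c, s)
    = (((pvNew s l).foldl (fun (p : Int × Int) x => if p.2 < cnt x then (x, cnt x) else p) (b, c)).1,
       ((pvNew s l).foldl (fun (p : Int × Int) x => if p.2 < cnt x then (x, cnt x) else p) (b, c)).2,
       l.foldl PySem.Set.add s) := by
  intro l
  induction l with
  | nil => intro s b c; simp [pvNew]
  | cons x t ih =>
    intro s b c
    rw [List.foldl_cons, List.foldl_cons (f := PySem.Set.add)]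
    by_cases h : PySem.Set.contains s x
    · have hm : x ∈ s := by simpa [PySem.Set.contains] using h
      rw [if_pos h, show pvNew s (x :: t) = pvNew s t from by simp [pvNew, hm],
          PySem.Set.add_of_mem hm]
      exact ih s b c
    · have hm : x ∉ s := by simpa [PySem.Set.contains] using h
      rw [if_neg h, show pvNew s (x :: t) = x :: pvNew (PySem.Set.add s x) t from by
            simp [pvNew, hm],
          List.foldl_cons]
      by_cases hc : c < cnt x
      · rw [if_pos hc, if_pos hc]
        exact ih _ x (cnt x)
      · rw [if_neg hc, if_neg hc]
        exact ih _ b c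

-- head of insertBy (reverse order) only looks at the old head
theorem pvHead_insertBy (key : Int × Int → Int) (x : Int × Int) (l : List (Int × Int)) :
    (PySem.List.insertBy (fun a b => decide (key b < key a)) x l).head? =
      some (match l.head? with
            | none => x
            | some y => if key y < key x then x else y) := by
  cases l with
  | nil => simp [PySem.List.insertBy]
  | cons y t =>
    by_cases h : key y < key x <;> simp [PySem.List.insertBy, h]

-- head of the insertBy fold = running "first strict max" fold
theorem pvHead_foldl_insertBy (key : Int × Int → Int) :
    ∀ (l : List (Int × Int)) (acc : List (Int × Int)),
    (l.foldl (fun acc x => PySem.List.insertBy (fun a b => decide (key b < key a)) x acc) acc).head? =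
      l.foldl
        (fun (o : Option (Int × Int)) x =>
          match o with
          | none => some x
          | some b => if key b < key x then some x else some b)
        acc.head? := by
  intro l
  induction l with
  | nil => intro acc; simp
  | cons x t ih =>
    intro acc
    rw [List.foldl_cons, List.foldl_cons, ih, pvHead_insertBy]
    cases acc with
    | nil => simp
    | cons y t' => by_cases h : key y < key x <;> simp [h]

-- option-valued best fold from `some p` = pair-valued best fold from p
theorem pvOpt_fold (cnt : Int → Int) : ∀ (l : List Int) (p : Int × Int),
    l.foldl
      (fun (o : Option (Int × Int)) k =>
        match o with
        | none => some (k, cnt k)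
        | some b => if b.2 < cnt k then some (k, cnt k) else some b)
      (some p)
    = some (l.foldl (fun (q : Int × Int) x => if q.2 < cnt x then (x, cnt x) else q) p) := by
  intro l
  induction l with
  | nil => intro p; simp
  | cons x t ih =>
    intro p
    by_cases h : p.2 < cnt x <;> simp [List.foldl_cons, h, ih]

-- A's counting loop body equals the canonical counter step
theorem pvStep_eq (d : PySem.Dict Int Int) (res : Int) :
    (if d.contains res then d.insert res (d.getD res 0 + 1) else d.insert res 1)
      = d.insert res (d.getD res 0 + 1) := by
  by_cases h : d.contains res
  · simp [h]
  · have h0 : d.getD res 0 = 0 := PySem.Dict.getD_of_not_contains d 0 (by simpa using h)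
    simp [h, h0]

-- pyGet? at index 0 is head?
theorem pvPyGet_zero (l : List (Int × Int)) : PySem.List.pyGet? l 0 = l.head? := by
  cases l <;> simp [PySem.List.pyGet?, PySem.List.pyIdx?]

-- ===== VERDICT (by name: the statement is the Claim_ definition above) =====
theorem responseOfNeighbours_spec : Claim_equal_responseOfNeighbours := by
  intro neighbours _hdom hpre
  obtain ⟨hne, _hrows⟩ := hpre
  unfold Spec_responseOfNeighbours
  simp only [responseOfNeighbours, responseOfNeighbours_alt]
  set labels := neighbours.map pvLast with hlabels
  have hlne : labels ≠ [] := by simpa [hlabels] using hne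
  set cnt : Int → Int := fun x => (labels.count x : Int) with hcnt
  set g : Int × Int → Int → Int × Int :=
    fun p x => if p.2 < cnt x then (x, cnt x) else p with hg
  -- A's dict is counter labels
  have hdict :
      (PySem.List.pyRange 0 (PySem.List.len neighbours)).foldl
        (fun d i =>
          if d.contains (pvLast (PySem.List.pyGetD neighbours i []))
          then d.insert (pvLast (PySem.List.pyGetD neighbours i []))
                 (d.getD (pvLast (PySem.List.pyGetD neighbours i [])) 0 + 1)
          else d.insert (pvLast (PySem.List.pyGetD neighbours i [])) 1)
        PySem.Dict.empty
      = PySem.Dict.counter labels := by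
    refine (PySem.List.foldl_pyRange_pyGetD neighbours ([] : List Int)
        (fun (d : PySem.Dict Int Int) row =>
          if d.contains (pvLast row) then d.insert (pvLast row) (d.getD (pvLast row) 0 + 1)
          else d.insert (pvLast row) 1)
        PySem.Dict.empty (le_refl 0)).trans ?_
    simp only [Int.toNat_zero, List.drop_zero]
    rw [show (fun (d : PySem.Dict Int Int) (row : List Int) =>
          if d.contains (pvLast row) then d.insert (pvLast row) (d.getD (pvLast row) 0 + 1)
          else d.insert (pvLast row) 1)
        = fun d row => d.insert (pvLast row) (d.getD (pvLast row) 0 + 1) from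
      funext fun d => funext fun row => pvStep_eq d (pvLast row)]
    rw [← List.foldl_map (f := pvLast)
        (g := fun (d : PySem.Dict Int Int) x => d.insert x (d.getD x 0 + 1))]
    exact PySem.Dict.foldl_insert_getD_add_one_eq_counter labels
  rw [hdict, PySem.Dict.items_counter]
  set D := PySem.Set.ofList labels with hD
  have hDne : D ≠ [] := by
    cases hl : labels with
    | nil => exact absurd hl hlne
    | cons a t =>
      intro hDnil
      have : a ∈ D := by
        rw [hD, hl]; exact (PySem.Set.mem_ofList _ _).2 (List.mem_cons_self ..)
      simp [hDnil] at this
  obtain ⟨d0, Dr, hDcons⟩ := List.exists_cons_of_ne_nil hDne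
  have hd0pos : 0 < cnt d0 := by
    have hd0mem : d0 ∈ labels := by
      have : d0 ∈ D := by rw [hDcons]; exact List.mem_cons_self ..
      exact (PySem.Set.mem_ofList _ _).1 (by rwa [hD] at this)
    have := List.count_pos_iff.2 hd0mem
    simp only [hcnt]; exact_mod_cast this
  -- A side: head of the reverse-sorted items is the running strict max over D
  have hhead :
      (PySem.List.sorted (D.map fun k => (k, cnt k)) (fun p => p.2) true).head? =
        some (Dr.foldl g (d0, cnt d0)) := by
    rw [PySem.List.sorted_rev_eq_foldl_insertBy,
        pvHead_foldl_insertBy (fun p => p.2), List.foldl_map, hDcons, List.foldl_cons]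
    simpa [hg] using pvOpt_fold cnt Dr (d0, cnt d0)
  rw [pvPyGet_zero, hhead]
  -- B side: collapse the seen-set loop into the same fold over D
  rw [show (fun (st : Int × Int × PySem.Set Int) lab =>
        if PySem.Set.contains st.2.2 lab then st
        else
          let seen := PySem.Set.add st.2.2 lab
          let c : Int := (labels.count lab : Int)
          if st.2.1 < c then (lab, c, seen) else (st.1, st.2.1, seen))
      = (fun (st : Int × Int × PySem.Set Int) lab =>
          if PySem.Set.contains st.2.2 lab then st
          else
            if st.2.1 < cnt lab then (lab, cnt lab, PySem.Set.add st.2.2 lab)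
            else (st.1, st.2.1, PySem.Set.add st.2.2 lab)) from rfl]
  rw [pvB_fold cnt labels PySem.Set.empty _ 0, pvNew_empty_eq_ofList, ← hD, hDcons,
      List.foldl_cons]
  have hfirst : (if (0 : Int) < cnt d0
      then (d0, cnt d0)
      else ((PySem.List.pyGet? labels 0).getD 0, (0 : Int))) = (d0, cnt d0) := by
    simp [hd0pos]
  simp only [hg] at hfirst ⊢
  rw [hfirst]
  rfl
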